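-- pv_equiv track=rewrite | github.com/linhdvu14/cp-sols | sols/CodeForces/1863_d12_pinely/B_Split_Sort.py | solve
-- ===== SOURCE A (Python) =====
-- def solve(N, P):
--     pos = [-1] * N
--     for i, p in enumerate(P): pos[p - 1] = i
--
--     res = 0
--     for i in range(N):
--         if pos[i] == -1: continue
--         res += 1
--         prev, pos[i] = pos[i], -1
--         while i + 1 < N and pos[i + 1] > prev:
--             prev, pos[i + 1] = pos[i + 1], -1
--             i += 1
--
--     return res - 1
-- ===== SOURCE B (Python) =====
-- def solve(N, P):
--     pos = [-1] * N
--     for i, p in enumerate(P):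
--         pos[p - 1] = i
--     res, prev = 0, -1
--     for x in pos:
--         if x != -1 and (prev == -1 or x <= prev):
--             res += 1
--         prev = x
--     return res - 1
-- ===== Notes on version B (the rewrite author's own statement) =====
-- stated objective: simpler
-- what changed: Replaces A's nested while-loop that walks ahead marking consumed positions -1 with a single immutable scan over pos keeping only the previous value, counting run starts (x != -1 and (prev == -1 or x <= prev)); same res-1 phrasing so N<=0 gives -1 naturally.
import Mathlib
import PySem

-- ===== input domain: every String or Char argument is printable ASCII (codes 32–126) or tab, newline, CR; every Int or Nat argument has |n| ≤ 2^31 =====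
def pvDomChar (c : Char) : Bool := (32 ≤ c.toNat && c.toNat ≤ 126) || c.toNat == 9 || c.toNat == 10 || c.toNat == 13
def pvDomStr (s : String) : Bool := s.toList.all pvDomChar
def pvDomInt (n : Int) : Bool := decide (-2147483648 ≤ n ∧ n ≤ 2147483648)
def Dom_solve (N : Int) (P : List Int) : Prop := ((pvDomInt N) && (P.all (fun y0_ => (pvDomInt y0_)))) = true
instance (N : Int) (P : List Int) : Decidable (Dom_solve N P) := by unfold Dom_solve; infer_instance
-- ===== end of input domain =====

-- B replaces A's nested consume-and-mark while-loop with a single immutable prev/curr scan counting run starts; objective: simpler.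

-- ===== PORT A =====
-- pos = [-1]*N; for i, p in enumerate(P): pos[p-1] = i     (these two lines are verbatim identical in A and B)
def buildPos (N : Int) (P : List Int) : List Int :=
  (PySem.List.enumerate P 0).foldl
    (fun pos ip => PySem.List.pySetD pos (ip.2 - 1) ip.1)
    (List.replicate N.toNat (-1))

-- while i + 1 < N and pos[i + 1] > prev: prev, pos[i+1] = pos[i+1], -1; i += 1
-- (pyGetD/pySetD are exact here: under Pre_solve every index touched is in range)
def solveInner (N : Int) (pos : List Int) (i : Nat) (prev : Int) : List Int × Nat :=
  if h : (i : Int) + 1 < N ∧ prev < PySem.List.pyGetD pos ((i : Int) + 1) 0 then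
    solveInner N (PySem.List.pySetD pos ((i : Int) + 1) (-1)) (i + 1)
      (PySem.List.pyGetD pos ((i : Int) + 1) 0)
  else (pos, i)
termination_by N.toNat - i
decreasing_by all_goals omega

-- for i in range(N): if pos[i] == -1: continue; res += 1; prev, pos[i] = pos[i], -1; <while>
def solveOuter (N : Int) (pos : List Int) (res : Int) (i : Nat) : Int :=
  if h : (i : Int) < N then
    if PySem.List.pyGetD pos (i : Int) 0 = -1 then
      solveOuter N pos res (i + 1)
    else
      solveOuter N (solveInner N (PySem.List.pySetD pos (i : Int) (-1)) i
        (PySem.List.pyGetD pos (i : Int) 0)).1 (res + 1) (i + 1)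
  else res
termination_by N.toNat - i
decreasing_by all_goals omega

def solve (N : Int) (P : List Int) : Int :=
  solveOuter N (buildPos N P) 0 0 - 1

-- ===== PORT B =====
-- res, prev = 0, -1; for x in pos: if x != -1 and (prev == -1 or x <= prev): res += 1; prev = x
def solve_alt (N : Int) (P : List Int) : Int :=
  let pos := buildPos N P
  (pos.foldl
    (fun (s : Int × Int) x =>
      (s.1 + (if x ≠ -1 ∧ (s.2 = -1 ∨ x ≤ s.2) then 1 else 0), x))
    (0, -1)).1 - 1

-- ===== PRECONDITION & SPEC =====
-- Pre_: exactly the inputs on which A's writes pos[p-1] = i are in range (otherwise A raises IndexError)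
def Pre_solve (N : Int) (P : List Int) : Prop :=
  ∀ p ∈ P, PySem.Raise.InRange N.toNat (p - 1)
instance (N : Int) (P : List Int) : Decidable (Pre_solve N P) := by unfold Pre_solve; infer_instance

def pvWitness_solve : Int × List Int := (3, [2, 1, 3])

def Spec_solve (N : Int) (P : List Int) (out : Int) : Prop := out = solve_alt N P
instance (N : Int) (P : List Int) (out : Int) : Decidable (Spec_solve N P out) := by unfold Spec_solve; infer_instance

-- ===== CLAIM (what is proved, stated in full; the proofs are below) =====
def Claim_equal_solve : Prop := ∀ (N : Int) (P : List Int), Dom_solve N P → Pre_solve N P → Spec_solve N P (solve N P)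

-- ===== LEMMAS AND PROOFS =====

-- cast variants of pyGetD_natCast / pySetD_natCast for the index shape (↑i + 1 : ℤ) the ports produce
theorem pyGetD_cast1 (xs : List Int) (i : Nat) (d : Int) :
    PySem.List.pyGetD xs ((i : Int) + 1) d = xs.getD (i + 1) d := by
  have h : ((i : Int) + 1) = ((i + 1 : Nat) : Int) := by push_cast; ring
  rw [h, PySem.List.pyGetD_natCast]

theorem pySetD_cast1 (xs : List Int) (i : Nat) (v : Int) :
    PySem.List.pySetD xs ((i : Int) + 1) v = xs.set (i + 1) v := by
  have h : ((i : Int) + 1) = ((i + 1 : Nat) : Int) := by push_cast; ring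
  rw [h, PySem.List.pySetD_natCast]

theorem getD_set_eq (xs : List Int) (i k : Nat) (v d : Int) :
    (xs.set i v).getD k d = if i = k ∧ i < xs.length then v else xs.getD k d := by
  simp only [List.getD_eq_getElem?_getD, List.getElem?_set]
  split_ifs with h1 h2 h3 h4 <;> simp_all <;> omega

-- run-start count of B's scan, as structural recursion on the list
def cnt (prev : Int) : List Int → Int
  | [] => 0
  | x :: rest => (if x ≠ -1 ∧ (prev = -1 ∨ x ≤ prev) then 1 else 0) + cnt x rest

theorem foldl_cnt (l : List Int) (r p : Int) :
    (l.foldl (fun (s : Int × Int) x =>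
      (s.1 + (if x ≠ -1 ∧ (s.2 = -1 ∨ x ≤ s.2) then 1 else 0), x)) (r, p)).1 = r + cnt p l := by
  induction l generalizing r p with
  | nil => simp [cnt]
  | cons x rest ih => simp only [List.foldl_cons, cnt, ih]; ring

theorem foldl_pySetD_length (l : List (Int × Int)) (init : List Int) :
    (l.foldl (fun pos ip => PySem.List.pySetD pos (ip.2 - 1) ip.1) init).length = init.length := by
  induction l generalizing init with
  | nil => simp
  | cons ip rest ih => simp [ih, PySem.List.length_pySetD]

theorem length_buildPos (N : Int) (P : List Int) : (buildPos N P).length = N.toNat := by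
  unfold buildPos
  rw [foldl_pySetD_length]
  simp

theorem mem_pySetD {x : Int} (xs : List Int) (i v : Int) (hx : x ∈ PySem.List.pySetD xs i v) :
    x ∈ xs ∨ x = v := by
  unfold PySem.List.pySetD PySem.List.pySet? at hx
  cases h : PySem.List.pyIdx? xs.length i with
  | none => rw [h] at hx; simp at hx; exact Or.inl hx
  | some k =>
      rw [h] at hx; simp at hx
      exact List.mem_or_eq_of_mem_set hx

theorem foldl_pySetD_mem (l : List (Int × Int)) (init : List Int)
    (hl : ∀ q ∈ l, -1 ≤ q.1) (hi : ∀ x ∈ init, -1 ≤ x) :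
    ∀ x ∈ l.foldl (fun pos ip => PySem.List.pySetD pos (ip.2 - 1) ip.1) init, -1 ≤ x := by
  induction l generalizing init with
  | nil => simpa using hi
  | cons ip rest ih =>
      simp only [List.foldl_cons]
      refine ih _ (fun q hq => hl q (List.mem_cons_of_mem _ hq)) ?_
      intro x hx
      rcases mem_pySetD _ _ _ hx with hx | hx
      · exact hi x hx
      · exact hx ▸ hl ip List.mem_cons_self

theorem enumerate_fst_le (l : List Int) (s : Int) :
    ∀ q ∈ PySem.List.enumerate l s, s ≤ q.1 := by
  induction l generalizing s with
  | nil => simp [PySem.List.enumerate_nil]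
  | cons y ys ih =>
      intro q hq
      rw [PySem.List.enumerate_cons] at hq
      rcases List.mem_cons.1 hq with hq | hq
      · simp [hq]
      · have := ih (s + 1) q hq; omega

theorem mem_buildPos (N : Int) (P : List Int) : ∀ x ∈ buildPos N P, -1 ≤ x := by
  unfold buildPos
  refine foldl_pySetD_mem _ _ ?_ ?_
  · intro q hq
    have := enumerate_fst_le P 0 q hq
    omega
  · intro x hx
    simp at hx
    omega

-- solveInner only writes -1s, so a cell already holding -1 keeps it
theorem inner_keep (N : Int) (pos : List Int) (j : Nat) (p : Int) (k : Nat)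
    (hk : pos.getD k 0 = -1) : (solveInner N pos j p).1.getD k 0 = -1 := by
  fun_induction solveInner N pos j p with
  | case1 pos j p h ih =>
      refine ih ?_
      rw [pySetD_cast1, getD_set_eq]
      split_ifs <;> simp_all
  | case2 => exact hk

-- the joint induction: A's outer loop (with the consume-and-mark inner loop) counts run starts
theorem main (d : Nat) :
    (∀ (N : Int) (pos : List Int) (j : Nat) (prev res : Int),
        pos.length = N.toNat → N.toNat - j = d → (∀ x ∈ pos, -1 ≤ x) → 0 ≤ prev →
        pos.getD j 0 = -1 → j < N.toNat →
        solveOuter N (solveInner N pos j prev).1 res (j + 1) = res + cnt prev (pos.drop (j + 1)))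
    ∧
    (∀ (N : Int) (pos : List Int) (i : Nat) (res : Int),
        pos.length = N.toNat → N.toNat - i = d → (∀ x ∈ pos, -1 ≤ x) →
        (i = 0 ∨ pos.getD (i - 1) 0 = -1) →
        solveOuter N pos res i = res + cnt (-1) (pos.drop i)) := by
  induction d using Nat.strong_induction_on with
  | _ d ih =>
  have h2 : ∀ (N : Int) (pos : List Int) (j : Nat) (prev res : Int),
      pos.length = N.toNat → N.toNat - j = d → (∀ x ∈ pos, -1 ≤ x) → 0 ≤ prev →
      pos.getD j 0 = -1 → j < N.toNat →
      solveOuter N (solveInner N pos j prev).1 res (j + 1) = res + cnt prev (pos.drop (j + 1)) := by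
    intro N pos j prev res hlen hd hm hp hj hjN
    rw [solveInner]
    split
    · next h =>
        simp only [pyGetD_cast1, pySetD_cast1] at h ⊢
        obtain ⟨hlt, hy⟩ := h
        have hj1 : j + 1 < pos.length := by omega
        have hyval : pos.getD (j + 1) 0 = pos[j + 1] := List.getD_eq_getElem pos 0 hj1
        have hy0 : 0 ≤ pos.getD (j + 1) 0 := le_trans hp (le_of_lt hy)
        have hkeep : (solveInner N (pos.set (j + 1) (-1)) (j + 1)
            (pos.getD (j + 1) 0)).1.getD (j + 1) 0 = -1 := by
          apply inner_keep
          rw [getD_set_eq, if_pos ⟨rfl, hj1⟩]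
        rw [solveOuter]
        rw [dif_pos (by push_cast; omega : ((j + 1 : Nat) : Int) < N)]
        rw [PySem.List.pyGetD_natCast, if_pos hkeep]
        have ihm : N.toNat - (j + 1) < d := by omega
        have hrec := (ih _ ihm).1 N (pos.set (j + 1) (-1)) (j + 1) (pos.getD (j + 1) 0) res
          (by simpa using hlen) rfl
          (by
            intro x hx
            rcases List.mem_or_eq_of_mem_set hx with hx | hx
            · exact hm x hx
            · omega)
          hy0
          (by rw [getD_set_eq, if_pos ⟨rfl, hj1⟩])
          (by omega)
        rw [hrec]
        rw [← List.getElem_cons_drop hj1]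
        simp only [cnt]
        rw [List.drop_set, if_pos (by omega)]
        rw [if_neg (by rw [hyval] at hy hy0; rw [not_and_or]; right; rw [not_or]; constructor <;> omega)]
        rw [hyval]
        ring
    · next h =>
        change solveOuter N pos res (j + 1) = _
        by_cases hend : ((j : Int) + 1) < N
        · have hy : ¬ prev < PySem.List.pyGetD pos ((j : Int) + 1) 0 := by tauto
          rw [pyGetD_cast1] at hy
          rw [not_lt] at hy
          have hj1 : j + 1 < pos.length := by omega
          have ihm : N.toNat - (j + 1) < d := by omega
          have h1 := (ih _ ihm).2 N pos (j + 1) res hlen rfl hm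
            (Or.inr (by simpa using hj))
          rw [h1]
          rw [← List.getElem_cons_drop hj1]
          simp only [cnt]
          have hyval : pos.getD (j + 1) 0 = pos[j + 1] := List.getD_eq_getElem pos 0 hj1
          rw [hyval] at hy
          congr 2
          split_ifs with ha hb <;> first | rfl | (exfalso; tauto)
        · rw [solveOuter, dif_neg (by push_cast; omega)]
          rw [List.drop_eq_nil_of_le (by omega), cnt]
          ring
  refine ⟨h2, ?_⟩
  intro N pos i res hlen hd hm hi
  by_cases hiN : (i : Int) < N
  · have hiN' : i < N.toNat := by omega
    have hil : i < pos.length := by omega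
    have hxval : pos.getD i 0 = pos[i] := List.getD_eq_getElem pos 0 hil
    rw [solveOuter, dif_pos hiN, PySem.List.pyGetD_natCast]
    by_cases hx : pos.getD i 0 = -1
    · rw [if_pos hx]
      have hrec := (ih (N.toNat - (i + 1)) (by omega)).2 N pos (i + 1) res hlen rfl hm
        (Or.inr (by simpa using hx))
      rw [hrec, ← List.getElem_cons_drop hil]
      simp only [cnt]
      have hx' : pos[i] = -1 := hxval.symm.trans hx
      rw [if_neg (by simp [hx']), hx']
      ring
    · rw [if_neg hx, PySem.List.pySetD_natCast]
      have hx0 : 0 ≤ pos.getD i 0 := by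
        have hmem := hm _ (List.getElem_mem hil)
        rw [hxval] at hx ⊢
        omega
      have hset1 : (pos.set i (-1)).getD i 0 = -1 := by
        rw [getD_set_eq, if_pos ⟨rfl, hil⟩]
      have hrec := h2 N (pos.set i (-1)) i (pos.getD i 0) (res + 1)
        (by simpa using hlen) (by omega)
        (by
          intro x hxm
          rcases List.mem_or_eq_of_mem_set hxm with hxm | hxm
          · exact hm x hxm
          · omega)
        hx0 hset1 hiN'
      rw [hrec]
      rw [List.drop_set, if_pos (by omega)]
      rw [← List.getElem_cons_drop hil]
      simp only [cnt]
      rw [hxval] at hx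
      rw [if_pos (by tauto), hxval]
      ring
  · rw [solveOuter, dif_neg hiN]
    rw [List.drop_eq_nil_of_le (by omega), cnt]
    ring

-- ===== VERDICT (by name: the statement is the Claim_ definition above) =====
theorem solve_spec : Claim_equal_solve := by
  intro N P _ _
  unfold Spec_solve solve solve_alt
  show solveOuter N (buildPos N P) 0 0 - 1 =
    ((buildPos N P).foldl (fun (s : Int × Int) x =>
      (s.1 + (if x ≠ -1 ∧ (s.2 = -1 ∨ x ≤ s.2) then 1 else 0), x)) (0, -1)).1 - 1
  have h := (main (N.toNat - 0)).2 N (buildPos N P) 0 0 (length_buildPos N P) rfl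
    (mem_buildPos N P) (Or.inl rfl)
  simp only [List.drop_zero] at h
  rw [foldl_cnt, h]
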